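-- pv_equiv track=rewrite | github.com/Superbumas/renova_ai | backend/spatial_validator.py | _furniture_types_match
-- ===== SOURCE A (Python) =====
-- def _furniture_types_match(detected_type: str, planned_type: str) -> bool:
--     """Check if detected and planned furniture types match"""
--
--     if not detected_type or not planned_type:
--         return False
--
--     # Create mapping between different naming conventions
--     type_mappings = {
--         'sofa': ['sofa', 'couch'],
--         'coffee_table': ['coffee_table', 'table'],
--         'dining_table': ['dining_table', 'table'],
--         'tv_unit': ['tv_unit', 'entertainment_center'],
--         'kitchen_island': ['island', 'kitchen_island'],
--         'bed': ['bed'],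
--         'dresser': ['dresser', 'cabinet'],
--         'nightstand': ['nightstand', 'side_table']
--     }
--
--     for canonical_type, variants in type_mappings.items():
--         if detected_type in variants and planned_type in variants:
--             return True
--
--     return detected_type.lower() == planned_type.lower()
-- ===== SOURCE B (Python) =====
-- # B: precomputed inverted index variant -> set of canonical groups; match = non-empty
-- # intersection of the two groups sets, else case-insensitive equality.
-- _TYPE_MAPPINGS = {
--     'sofa': ['sofa', 'couch'],
--     'coffee_table': ['coffee_table', 'table'],
--     'dining_table': ['dining_table', 'table'],
--     'tv_unit': ['tv_unit', 'entertainment_center'],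
--     'kitchen_island': ['island', 'kitchen_island'],
--     'bed': ['bed'],
--     'dresser': ['dresser', 'cabinet'],
--     'nightstand': ['nightstand', 'side_table'],
-- }
-- _VARIANT_TO_GROUPS = {}
-- for _canonical, _variants in _TYPE_MAPPINGS.items():
--     for _v in _variants:
--         _VARIANT_TO_GROUPS.setdefault(_v, set()).add(_canonical)
--
--
-- def _furniture_types_match(detected_type: str, planned_type: str) -> bool:
--     if not detected_type or not planned_type:
--         return False
--     if _VARIANT_TO_GROUPS.get(detected_type, frozenset()) & _VARIANT_TO_GROUPS.get(planned_type, frozenset()):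
--         return True
--     return detected_type.lower() == planned_type.lower()
-- ===== Notes on version B (the rewrite author's own statement) =====
-- stated objective: alternative
-- what changed: Replaces the per-call loop over all (canonical, variants) groups (with two list-membership scans per group) by an inverted index precomputed once at module load, mapping each variant string to the set of canonical groups containing it; matching becomes two dict lookups plus a set intersection.
import Mathlib
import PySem

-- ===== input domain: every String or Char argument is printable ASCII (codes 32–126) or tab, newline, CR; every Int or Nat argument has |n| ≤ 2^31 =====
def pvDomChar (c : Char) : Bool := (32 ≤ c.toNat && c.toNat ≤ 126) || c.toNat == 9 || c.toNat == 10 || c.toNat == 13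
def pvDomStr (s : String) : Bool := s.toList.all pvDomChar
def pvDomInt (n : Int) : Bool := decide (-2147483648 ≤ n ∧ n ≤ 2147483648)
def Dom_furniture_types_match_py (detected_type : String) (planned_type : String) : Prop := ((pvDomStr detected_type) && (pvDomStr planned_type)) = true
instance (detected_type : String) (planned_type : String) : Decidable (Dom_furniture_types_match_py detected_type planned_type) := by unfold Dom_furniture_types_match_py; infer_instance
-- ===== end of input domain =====

-- B replaces A's per-call scan over all groups by a precomputed inverted index
-- (variant -> set of canonical groups) and a set-intersection test (objective: alternative).

-- ===== PORT A =====
def pvTypeMappings : List (String × List String) :=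
  [("sofa", ["sofa", "couch"]),
   ("coffee_table", ["coffee_table", "table"]),
   ("dining_table", ["dining_table", "table"]),
   ("tv_unit", ["tv_unit", "entertainment_center"]),
   ("kitchen_island", ["island", "kitchen_island"]),
   ("bed", ["bed"]),
   ("dresser", ["dresser", "cabinet"]),
   ("nightstand", ["nightstand", "side_table"])]

-- the for-loop with early 'return True' and the fall-through lower-case comparison
def pvALoop (detected_type planned_type : String) : List (String × List String) → Bool
  | [] => PySem.Str.lower detected_type == PySem.Str.lower planned_type
  | (_, variants) :: rest =>
      if variants.contains detected_type && variants.contains planned_type then true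
      else pvALoop detected_type planned_type rest

def furniture_types_match_py (detected_type : String) (planned_type : String) : Bool :=
  if detected_type = "" || planned_type = "" then false
  else pvALoop detected_type planned_type pvTypeMappings

-- ===== PORT B =====
-- the inverted index Source B builds once at module load, written out as the literal it computes:
-- variant string -> set of canonical groups containing it (PySem.Set as List of distinct elements)
def pvVariantToGroups : List (String × List String) :=
  [("sofa", ["sofa"]),
   ("couch", ["sofa"]),
   ("coffee_table", ["coffee_table"]),
   ("table", ["coffee_table", "dining_table"]),
   ("dining_table", ["dining_table"]),
   ("tv_unit", ["tv_unit"]),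
   ("entertainment_center", ["tv_unit"]),
   ("island", ["kitchen_island"]),
   ("kitchen_island", ["kitchen_island"]),
   ("bed", ["bed"]),
   ("dresser", ["dresser"]),
   ("cabinet", ["dresser"]),
   ("nightstand", ["nightstand"]),
   ("side_table", ["nightstand"])]

-- dict.get(v, frozenset()) on the index
def pvGroupsOf (v : String) : List (String × List String) → List String
  | [] => []
  | (k, gs) :: rest => if k == v then gs else pvGroupsOf v rest

def furniture_types_match_py_alt (detected_type : String) (planned_type : String) : Bool :=
  if detected_type = "" || planned_type = "" then false
  else
    let g1 := pvGroupsOf detected_type pvVariantToGroups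
    let g2 := pvGroupsOf planned_type pvVariantToGroups
    if g1.any (fun c => g2.contains c) then true
    else PySem.Str.lower detected_type == PySem.Str.lower planned_type

-- ===== PRECONDITION & SPEC =====
def Spec_furniture_types_match_py (detected_type : String) (planned_type : String) (out : Bool) : Prop := out = furniture_types_match_py_alt detected_type planned_type
instance (detected_type : String) (planned_type : String) (out : Bool) : Decidable (Spec_furniture_types_match_py detected_type planned_type out) := by unfold Spec_furniture_types_match_py; infer_instance

-- ===== CLAIM (what is proved, stated in full; the proofs are below) =====
def Claim_equal_furniture_types_match_py : Prop := ∀ (detected_type : String) (planned_type : String), Dom_furniture_types_match_py detected_type planned_type → Spec_furniture_types_match_py detected_type planned_type (furniture_types_match_py detected_type planned_type)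

-- ===== LEMMAS AND PROOFS =====

-- every string occurring as a variant (= every key of the inverted index)
def pvAllVariants : List String :=
  ["sofa", "couch", "coffee_table", "table", "dining_table", "tv_unit",
   "entertainment_center", "island", "kitchen_island", "bed", "dresser",
   "cabinet", "nightstand", "side_table"]

-- both inputs known variant strings: finite check
theorem pv_inin : ∀ d ∈ pvAllVariants, ∀ p ∈ pvAllVariants,
    furniture_types_match_py d p = furniture_types_match_py_alt d p := by decide

theorem pv_outD (d p : String) (hd : d ∉ pvAllVariants) :
    furniture_types_match_py d p = furniture_types_match_py_alt d p := by
  simp only [pvAllVariants, List.mem_cons, List.not_mem_nil, or_false, not_or] at hd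
  obtain ⟨h1, h2, h3, h4, h5, h6, h7, h8, h9, h10, h11, h12, h13, h14⟩ := hd
  simp [furniture_types_match_py, furniture_types_match_py_alt, pvALoop, pvTypeMappings,
        pvGroupsOf, pvVariantToGroups,
        h1, h2, h3, h4, h5, h6, h7, h8, h9, h10, h11, h12, h13, h14,
        Ne.symm h1, Ne.symm h2, Ne.symm h3, Ne.symm h4, Ne.symm h5, Ne.symm h6, Ne.symm h7,
        Ne.symm h8, Ne.symm h9, Ne.symm h10, Ne.symm h11, Ne.symm h12, Ne.symm h13, Ne.symm h14]

theorem pv_outP (d p : String) (hp : p ∉ pvAllVariants) :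
    furniture_types_match_py d p = furniture_types_match_py_alt d p := by
  simp only [pvAllVariants, List.mem_cons, List.not_mem_nil, or_false, not_or] at hp
  obtain ⟨h1, h2, h3, h4, h5, h6, h7, h8, h9, h10, h11, h12, h13, h14⟩ := hp
  simp [furniture_types_match_py, furniture_types_match_py_alt, pvALoop, pvTypeMappings,
        pvGroupsOf, pvVariantToGroups,
        h1, h2, h3, h4, h5, h6, h7, h8, h9, h10, h11, h12, h13, h14,
        Ne.symm h1, Ne.symm h2, Ne.symm h3, Ne.symm h4, Ne.symm h5, Ne.symm h6, Ne.symm h7,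
        Ne.symm h8, Ne.symm h9, Ne.symm h10, Ne.symm h11, Ne.symm h12, Ne.symm h13, Ne.symm h14]

-- ===== VERDICT (by name: the statement is the Claim_ definition above) =====
theorem furniture_types_match_py_spec : Claim_equal_furniture_types_match_py := by
  intro d p _
  unfold Spec_furniture_types_match_py
  by_cases hd : d ∈ pvAllVariants
  · by_cases hp : p ∈ pvAllVariants
    · exact pv_inin d hd p hp
    · exact pv_outP d p hp
  · exact pv_outD d p hd
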